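-- pv_equiv track=rewrite | github.com/Pra28sad/learning_task_audio_joshtalks | q2_disfluency_detection/q2_disfluency_extra.py | _find_repetitions
-- ===== SOURCE A (Python) =====
-- from typing import Dict, List, Tuple
--
-- def _find_repetitions(tokens: List[str]) -> List[Tuple[int, int, str]]:
--     """Find runs of repeated consecutive words. Returns (start_idx, end_idx, word)."""
--     reps = []
--     i = 0
--     while i < len(tokens) - 1:
--         if tokens[i] == tokens[i + 1]:
--             j = i + 1
--             while j < len(tokens) and tokens[j] == tokens[i]:
--                 j += 1
--             reps.append((i, j - 1, tokens[i]))
--             i = j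
--         else:
--             i += 1
--     return reps
-- ===== SOURCE B (Python) =====
-- from typing import List, Tuple
--
-- def _find_repetitions(tokens: List[str]) -> List[Tuple[int, int, str]]:
--     """Find runs of repeated consecutive words. Returns (start_idx, end_idx, word)."""
--     n = len(tokens)
--     # stage 1: positions where a new run of equal words begins
--     starts = [i for i in range(n) if i == 0 or tokens[i] != tokens[i - 1]]
--     # stage 2: pair each run start with the next boundary; keep runs of length >= 2
--     bounds = starts + [n]
--     return [(s, e - 1, tokens[s])
--             for s, e in zip(bounds, bounds[1:])
--             if e - s >= 2]
-- ===== Notes on version B (the rewrite author's own statement) =====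
-- stated objective: alternative
-- what changed: Replaces A's advancing two-pointer while-loop scan by a staged boundary-index computation: first build the list of run-start indices, then pair adjacent boundaries with zip and keep pairs spanning >= 2 positions.
import Mathlib
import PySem

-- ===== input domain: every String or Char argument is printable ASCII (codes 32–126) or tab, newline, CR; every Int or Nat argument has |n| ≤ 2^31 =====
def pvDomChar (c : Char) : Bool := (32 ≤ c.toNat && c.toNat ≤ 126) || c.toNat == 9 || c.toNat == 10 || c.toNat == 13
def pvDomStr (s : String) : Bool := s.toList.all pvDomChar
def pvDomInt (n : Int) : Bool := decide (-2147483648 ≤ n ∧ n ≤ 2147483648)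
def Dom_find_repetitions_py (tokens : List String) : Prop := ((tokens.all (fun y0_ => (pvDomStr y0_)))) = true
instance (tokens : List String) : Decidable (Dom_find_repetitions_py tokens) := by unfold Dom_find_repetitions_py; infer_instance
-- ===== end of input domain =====

-- B replaces A's advancing two-pointer scan by a staged boundary computation:
-- first the list of run-start indices, then adjacent boundaries paired with zip,
-- keeping pairs that span ≥ 2 positions; objective: alternative. Both total, no Pre_.

-- ===== PORT A =====
-- inner 'while j < len(tokens) and tokens[j] == tokens[i]: j += 1'
-- (indices are always nonnegative and in range where read, so getD is exact)
def aInner (tokens : List String) (i j : Nat) : Nat :=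
  if _h : j < tokens.length ∧ tokens.getD j "" = tokens.getD i "" then
    aInner tokens i (j + 1)
  else j
termination_by tokens.length - j
decreasing_by exact Nat.sub_succ_lt_self _ _ _h.1

lemma aInner_ge (tokens : List String) (i j : Nat) : j ≤ aInner tokens i j := by
  unfold aInner
  split
  · next h => exact le_trans (Nat.le_succ j) (aInner_ge tokens i (j + 1))
  · exact le_refl j
termination_by tokens.length - j
decreasing_by exact Nat.sub_succ_lt_self _ _ (by assumption : _ ∧ _).1

-- outer 'while i < len(tokens) - 1' loop
def aLoop (tokens : List String) (i : Nat) (reps : List (Int × Int × String)) :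
    List (Int × Int × String) :=
  if _h : i + 1 < tokens.length then
    if tokens.getD i "" = tokens.getD (i + 1) "" then
      let j := aInner tokens i (i + 1)
      aLoop tokens j (reps ++ [((i : Int), (j : Int) - 1, tokens.getD i "")])
    else
      aLoop tokens (i + 1) reps
  else reps
termination_by tokens.length - i
decreasing_by
  · exact Nat.sub_lt_sub_left (Nat.lt_of_succ_lt _h)
      (Nat.lt_of_lt_of_le (Nat.lt_succ_self i) (aInner_ge tokens i (i + 1)))
  · exact Nat.sub_succ_lt_self _ _ (Nat.lt_of_succ_lt _h)

def find_repetitions_py (tokens : List String) : List (Int × Int × String) :=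
  aLoop tokens 0 []

-- ===== PORT B =====
-- stage 1: 'starts = [i for i in range(n) if i == 0 or tokens[i] != tokens[i-1]]'
-- (indices read are in range, so getD is exact; '||' short-circuits like 'or')
def bStarts (tokens : List String) : List Nat :=
  (List.range tokens.length).filter
    (fun i => i == 0 || !(tokens.getD i "" == tokens.getD (i - 1) ""))

-- stage 2: 'bounds = starts + [n]'; pair adjacent boundaries, keep spans >= 2
def find_repetitions_py_alt (tokens : List String) : List (Int × Int × String) :=
  let bounds := bStarts tokens ++ [tokens.length]
  ((bounds.zip bounds.tail).filter
      (fun p => 2 ≤ ((p.2 : Int) - (p.1 : Int)))).map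
    (fun p => ((p.1 : Int), (p.2 : Int) - 1, tokens.getD p.1 ""))

-- ===== PRECONDITION & SPEC =====
def Spec_find_repetitions_py (tokens : List String) (out : List (Int × Int × String)) : Prop := out = find_repetitions_py_alt tokens
instance (tokens : List String) (out : List (Int × Int × String)) : Decidable (Spec_find_repetitions_py tokens out) := by unfold Spec_find_repetitions_py; infer_instance

-- ===== CLAIM (what is proved, stated in full; the proofs are below) =====
def Claim_equal_find_repetitions_py : Prop := ∀ (tokens : List String), Dom_find_repetitions_py tokens → Spec_find_repetitions_py tokens (find_repetitions_py tokens)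

-- ===== LEMMAS AND PROOFS =====

-- common intermediate form: recursion on runs (used only by the proofs)
def bGo : List String → Int → List (Int × Int × String)
  | [], _ => []
  | x :: rest, offset =>
    let n : Nat := 1 + (rest.takeWhile (fun w => w == x)).length
    let tail := bGo (rest.drop (n - 1)) (offset + (n : Int))
    if 2 ≤ n then (offset, offset + (n : Int) - 1, x) :: tail else tail
termination_by xs _ => xs.length
decreasing_by
  exact Nat.lt_succ_of_le (le_trans (Nat.le_of_eq List.length_drop) (Nat.sub_le _ _))

lemma drop_cons_of_lt (tokens : List String) (j : Nat) (h : j < tokens.length) :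
    tokens.drop j = tokens.getD j "" :: tokens.drop (j + 1) := by
  rw [List.drop_eq_getElem_cons h, List.getD_eq_getElem tokens "" h]

-- A's inner while counts exactly the prefix of the suffix at j equal to tokens[i]
lemma aInner_eq (tokens : List String) (i j : Nat) :
    aInner tokens i j =
      j + ((tokens.drop j).takeWhile (fun w => w == tokens.getD i "")).length := by
  unfold aInner
  split
  · next h =>
    obtain ⟨hj, he⟩ := h
    rw [aInner_eq tokens i (j + 1), drop_cons_of_lt tokens j hj]
    rw [List.takeWhile_cons_of_pos (by simpa using he)]
    simp; omega
  · next h =>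
    by_cases hj : j < tokens.length
    · have he : ¬ tokens.getD j "" = tokens.getD i "" := fun hc => h ⟨hj, hc⟩
      rw [drop_cons_of_lt tokens j hj, List.takeWhile_cons_of_neg (by simpa using he)]
      simp
    · rw [List.drop_eq_nil_of_le (by omega)]; simp
termination_by tokens.length - j
decreasing_by omega

-- main invariant for A: A's loop from index i equals reps ++ bGo of the suffix at i
lemma aLoop_eq_bGo (tokens : List String) (i : Nat) (reps : List (Int × Int × String)) :
    aLoop tokens i reps = reps ++ bGo (tokens.drop i) (i : Int) := by
  unfold aLoop
  split
  · next hlt =>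
    have hi : i < tokens.length := by omega
    have hdrop := drop_cons_of_lt tokens i hi
    have hdrop1 := drop_cons_of_lt tokens (i + 1) hlt
    split
    · next heq =>
      have hj := aInner_eq tokens i (i + 1)
      set x := tokens.getD i "" with hx
      set t := ((tokens.drop (i + 1)).takeWhile (fun w => w == x)).length with ht
      have ht1 : 1 ≤ t := by
        rw [ht, hdrop1, List.takeWhile_cons_of_pos (by simpa using heq.symm)]
        simp
      have hih := aLoop_eq_bGo tokens (aInner tokens i (i + 1))
        (reps ++ [((i : Int), ((aInner tokens i (i + 1) : Nat) : Int) - 1, x)])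
      rw [hih, hj]
      conv_rhs => rw [hdrop]
      simp only [bGo]
      have hn : 1 + ((tokens.drop (i + 1)).takeWhile (fun w => w == x)).length = 1 + t := by rw [ht]
      simp only [hn]
      have h2 : 2 ≤ 1 + t := by omega
      rw [if_pos h2]
      have hds : (tokens.drop (i + 1)).drop (1 + t - 1) = tokens.drop (i + 1 + t) := by
        rw [List.drop_drop]; congr 1; omega
      rw [hds]
      simp
      refine ⟨by ring, ?_⟩
      congr 1
      ring
    · next hne =>
      rw [aLoop_eq_bGo tokens (i + 1) reps]
      conv_rhs => rw [hdrop]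
      simp only [bGo]
      rw [hdrop1, List.takeWhile_cons_of_neg (by simpa using fun hc => hne hc.symm)]
      simp only [List.length_nil, Nat.add_zero]
      rw [if_neg (by omega), List.drop_zero, ← hdrop1]
      push_cast
      ring_nf
  · next hge =>
    match hd : tokens.drop i with
    | [] => simp [bGo]
    | x :: rest =>
      have : rest = [] := by
        have := List.length_drop (l := tokens) (i := i)
        rw [hd] at this; simp at this
        cases rest with
        | nil => rfl
        | cons a l => simp at this; omega
      subst this
      simp [bGo]

-- filter commutes with map
lemma filter_map_comm {α β : Type} (f : α → β) (p : β → Bool) :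
    ∀ l : List α, (l.map f).filter p = (l.filter (fun a => p (f a))).map f
  | [] => rfl
  | a :: l => by
    cases h : p (f a) <;>
      simp [h, filter_map_comm f p l]

lemma getD_drop' (l : List α) (n j : Nat) (d : α) :
    (l.drop n).getD j d = l.getD (n + j) d := by
  simp [List.getD_eq_getElem?_getD, List.getElem?_drop]

-- within the leading run, every token equals the head word
lemma getD_run (x : String) (rest : List String) (i : Nat)
    (hi : i ≤ (rest.takeWhile (fun w => w == x)).length) :
    (x :: rest).getD i "" = x := by
  cases i with
  | zero => rfl
  | succ k =>
    have hk : k < (rest.takeWhile (fun w => w == x)).length := by omega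
    have hkr : k < rest.length :=
      lt_of_lt_of_le hk (rest.takeWhile_prefix (fun w => w == x)).length_le
    have h1 : (rest.takeWhile (fun w => w == x))[k] = rest[k] :=
      (rest.takeWhile_prefix (fun w => w == x)).getElem hk
    have h2 : ((rest.takeWhile (fun w => w == x))[k] == x) = true :=
      List.mem_takeWhile_imp (p := fun w => w == x) (List.getElem_mem hk)
    have hx : rest[k] = x := by rw [h1] at h2; exact eq_of_beq h2
    simp [List.getElem?_eq_getElem hkr, hx]

-- the token right after the leading run differs from the head word
lemma getD_after_run (x : String) (rest : List String)
    (ht : (rest.takeWhile (fun w => w == x)).length < rest.length) :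
    ¬ rest.getD (rest.takeWhile (fun w => w == x)).length "" = x := by
  set t := (rest.takeWhile (fun w => w == x)).length with htdef
  have hne : rest.dropWhile (fun w => w == x) ≠ [] := by
    intro hnil
    have h := List.takeWhile_append_dropWhile (p := fun w => w == x) (l := rest)
    rw [hnil, List.append_nil] at h
    rw [← h] at ht
    omega
  have hdw : rest.drop t = rest.dropWhile (fun w => w == x) := by
    conv_lhs => rw [← List.takeWhile_append_dropWhile (p := fun w => w == x) (l := rest)]
    rw [htdef, List.drop_left]
  have hlt0 : 0 < (rest.dropWhile (fun w => w == x)).length := List.length_pos_iff.mpr hne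
  have hhead := List.head_dropWhile_not (p := fun w => w == x) (l := rest) hne
  have hgd : rest.getD t "" = (rest.dropWhile (fun w => w == x)).head hne := by
    have h1 := getD_drop' rest t 0 ""
    rw [Nat.add_zero] at h1
    rw [← h1, hdw, List.getD_eq_getElem _ "" hlt0, List.head_eq_getElem]
  intro hc
  rw [hgd] at hc
  rw [hc] at hhead
  simp at hhead

-- run decomposition of the boundary list
lemma bStarts_cons (x : String) (rest : List String) :
    bStarts (x :: rest) =
      0 :: (bStarts (rest.drop (rest.takeWhile (fun w => w == x)).length)).map
        (fun j => (1 + (rest.takeWhile (fun w => w == x)).length) + j) := by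
  set t := (rest.takeWhile (fun w => w == x)).length with htdef
  set s := rest.drop t with hsdef
  have htle : t ≤ rest.length := (rest.takeWhile_prefix (fun w => w == x)).length_le
  have hlen : (x :: rest).length = (1 + t) + s.length := by
    simp [hsdef]; omega
  unfold bStarts
  rw [hlen, List.range_add, List.filter_append]
  have hpartA :
      (List.range (1 + t)).filter
        (fun i => i == 0 || !((x :: rest).getD i "" == (x :: rest).getD (i - 1) "")) = [0] := by
    rw [Nat.add_comm 1 t, List.range_succ_eq_map, List.filter_cons, filter_map_comm]
    have hnil : (List.range t).filter
        (fun a => (Nat.succ a == 0 || !((x :: rest).getD (Nat.succ a) "" == (x :: rest).getD (Nat.succ a - 1) ""))) = [] := by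
      rw [List.filter_eq_nil_iff]
      intro i hi
      have hit : i < t := List.mem_range.mp hi
      have h1 := getD_run x rest (i + 1) (by omega)
      have h2 := getD_run x rest i (by omega)
      simp at h1 h2 ⊢
      simp [h1, h2]
    rw [hnil]
    simp
  rw [hpartA, filter_map_comm]
  have hpartB :
      (List.range s.length).filter
        (fun j => ((1 + t) + j == 0 || !((x :: rest).getD ((1 + t) + j) "" == (x :: rest).getD ((1 + t) + j - 1) ""))) =
      (List.range s.length).filter
        (fun j => (j == 0 || !(s.getD j "" == s.getD (j - 1) ""))) := by
    apply List.filter_congr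
    intro j hj
    have hjm : j < s.length := List.mem_range.mp hj
    have hgd : (x :: rest).getD ((1 + t) + j) "" = s.getD j "" := by
      have : (1 + t) + j = (t + j) + 1 := by omega
      rw [this, List.getD_cons_succ, hsdef, getD_drop']
    cases j with
    | zero =>
      have hts : t < rest.length := by
        have : s.length = rest.length - t := by rw [hsdef]; simp
        omega
      have hafter : ¬ rest.getD t "" = x := by
        rw [htdef] at hts ⊢; exact getD_after_run x rest hts
      have hpred : (x :: rest).getD ((1 + t) + 0 - 1) "" = x := by
        have h : (1 + t) + 0 - 1 = t := by omega
        rw [h]; exact getD_run x rest t htdef.le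
      have hcur : (x :: rest).getD ((1 + t) + 0) "" = rest.getD t "" := by
        have h : (1 + t) + 0 = t + 1 := by omega
        rw [h, List.getD_cons_succ]
      have hb : (rest.getD t "" == x) = false := beq_eq_false_iff_ne.mpr hafter
      rw [hcur, hpred, hb]
      simp
    | succ k =>
      have hgd1 : (x :: rest).getD ((1 + t) + (k + 1) - 1) "" = s.getD k "" := by
        have : (1 + t) + (k + 1) - 1 = (t + k) + 1 := by omega
        rw [this, List.getD_cons_succ, hsdef, getD_drop']
      simp only [hgd, hgd1]
      simp
  rw [hpartB]
  rfl

-- shifting bGo's offset shifts every reported index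
lemma bGo_shift (l : List String) (c d : Int) :
    bGo l (c + d) = (bGo l d).map (fun p => (p.1 + c, p.2.1 + c, p.2.2)) := by
  match l with
  | [] => simp [bGo]
  | x :: rest =>
    simp only [bGo]
    have hIH := bGo_shift (rest.drop ((1 + (rest.takeWhile (fun w => w == x)).length) - 1)) c
        (d + ((1 + (rest.takeWhile (fun w => w == x)).length : Nat) : Int))
    rw [show c + d + ((1 + (rest.takeWhile (fun w => w == x)).length : Nat) : Int)
          = c + (d + ((1 + (rest.takeWhile (fun w => w == x)).length : Nat) : Int)) by ring, hIH]
    split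
    · simp only [List.map_cons]
      refine congrArg₂ List.cons ?_ rfl
      refine Prod.ext (by ring) (Prod.ext (by simp; ring) rfl)
    · rfl
termination_by l.length
decreasing_by
  exact Nat.lt_succ_of_le (le_trans (Nat.le_of_eq List.length_drop) (Nat.sub_le _ _))

-- the boundary list always begins with 0
lemma bounds_head (l : List String) : ∃ tl, bStarts l ++ [l.length] = 0 :: tl := by
  cases l with
  | nil => exact ⟨[], rfl⟩
  | cons x rest => rw [bStarts_cons]; exact ⟨_, rfl⟩

-- B's pipeline equals the run recursion
lemma pipeline_eq (tokens : List String) :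
    find_repetitions_py_alt tokens = bGo tokens 0 := by
  match tokens with
  | [] => simp [find_repetitions_py_alt, bStarts, bGo]
  | x :: rest =>
    have htle : (rest.takeWhile (fun w => w == x)).length ≤ rest.length :=
      (rest.takeWhile_prefix _).length_le
    set t := (rest.takeWhile (fun w => w == x)).length with htdef
    set s := rest.drop t with hsdef
    have hslen : s.length = rest.length - t := by rw [hsdef]; simp
    have hIH : find_repetitions_py_alt s = bGo s 0 := pipeline_eq s
    obtain ⟨tl, htl⟩ := bounds_head s
    have hlen : (x :: rest).length = (1 + t) + s.length := by
      simp [hslen]; omega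
    -- abbreviations for the three stages
    set f : Nat → Nat := fun j => (1 + t) + j with hf
    -- the boundary list of x :: rest
    have hbounds : bStarts (x :: rest) ++ [(x :: rest).length]
        = 0 :: (f 0) :: (tl.map f) := by
      rw [bStarts_cons x rest, ← htdef, ← hsdef, hlen]
      show (0 :: (bStarts s).map f) ++ [f s.length] = _
      rw [List.cons_append]
      have hm : (bStarts s).map f ++ [f s.length] = ((bStarts s) ++ [s.length]).map f := by
        rw [List.map_append]; rfl
      rw [hm, htl, List.map_cons]
    -- reduce the pipeline on x :: rest
    have hunfold : find_repetitions_py_alt (x :: rest) =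
        ((((0 : Nat) :: (f 0) :: (tl.map f)).zip ((f 0) :: (tl.map f))).filter
            (fun q => 2 ≤ ((q.2 : Int) - (q.1 : Int)))).map
          (fun q => ((q.1 : Int), (q.2 : Int) - 1, (x :: rest).getD q.1 "")) := by
      unfold find_repetitions_py_alt
      rw [hbounds]
      rfl
    rw [hunfold]
    -- the zipped tail is the shifted pair list of s
    have hziptail : ((f 0) :: (tl.map f)).zip (tl.map f)
        = ((0 :: tl).zip tl).map (Prod.map f f) := by
      have : (f 0) :: (tl.map f) = (0 :: tl).map f := rfl
      rw [this, List.zip_map]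
    have hzip : (((0 : Nat) :: (f 0) :: (tl.map f)).zip ((f 0) :: (tl.map f)))
        = ((0 : Nat), f 0) :: ((0 :: tl).zip tl).map (Prod.map f f) := by
      rw [List.zip_cons_cons, hziptail]
    rw [hzip, List.filter_cons]
    -- filtering commutes with the index shift
    have hpred : (fun q : Nat × Nat => decide (2 ≤ ((((Prod.map f f) q).2 : Int) - (((Prod.map f f) q).1 : Int))))
        = (fun q : Nat × Nat => decide (2 ≤ ((q.2 : Int) - (q.1 : Int)))) := by
      funext q
      apply decide_eq_decide.mpr
      have hf1 : (Prod.map f f q).1 = (1 + t) + q.1 := rfl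
      have hf2 : (Prod.map f f q).2 = (1 + t) + q.2 := rfl
      rw [hf1, hf2]
      push_cast
      omega
    have htail : ((((0 :: tl).zip tl).map (Prod.map f f)).filter
            (fun q => 2 ≤ ((q.2 : Int) - (q.1 : Int)))).map
          (fun q => ((q.1 : Int), (q.2 : Int) - 1, (x :: rest).getD q.1 ""))
        = (bGo s 0).map (fun p => (p.1 + ((1 + t : Nat) : Int), p.2.1 + ((1 + t : Nat) : Int), p.2.2)) := by
      rw [filter_map_comm, hpred, List.map_map]
      have hfun : ((fun q : Nat × Nat => ((q.1 : Int), (q.2 : Int) - 1, (x :: rest).getD q.1 "")) ∘ Prod.map f f)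
          = (fun p : Int × Int × String => (p.1 + ((1 + t : Nat) : Int), p.2.1 + ((1 + t : Nat) : Int), p.2.2)) ∘
            (fun q : Nat × Nat => ((q.1 : Int), (q.2 : Int) - 1, s.getD q.1 "")) := by
        funext q
        have hf1 : (Prod.map f f q).1 = (1 + t) + q.1 := rfl
        have hf2 : (Prod.map f f q).2 = (1 + t) + q.2 := rfl
        have hgd : (x :: rest).getD ((1 + t) + q.1) "" = s.getD q.1 "" := by
          have h : (1 + t) + q.1 = (t + q.1) + 1 := by omega
          rw [h, List.getD_cons_succ, hsdef, getD_drop']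
        simp only [Function.comp_apply, hf1, hf2, hgd]
        refine Prod.ext (by push_cast; ring) (Prod.ext (by simp; ring) rfl)
      rw [hfun, ← List.map_map]
      have halt : ((((0 :: tl).zip tl).filter (fun q => 2 ≤ ((q.2 : Int) - (q.1 : Int)))).map
            (fun q => ((q.1 : Int), (q.2 : Int) - 1, s.getD q.1 ""))) = find_repetitions_py_alt s := by
        unfold find_repetitions_py_alt
        rw [htl]
        rfl
      rw [halt, hIH]
    -- compare with one unfolding of bGo
    have hdropeq : rest.drop (1 + t - 1) = s := by
      rw [hsdef]; congr 1; omega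
    have hshift : (bGo s 0).map (fun p => (p.1 + ((1 + t : Nat) : Int), p.2.1 + ((1 + t : Nat) : Int), p.2.2))
        = bGo s (0 + ((1 + t : Nat) : Int)) := by
      rw [show (0 + ((1 + t : Nat) : Int)) = ((1 + t : Nat) : Int) + 0 by ring, bGo_shift]
    by_cases h2 : 2 ≤ 1 + t
    · rw [if_pos (by show decide _ = true; apply decide_eq_true; have : f 0 = 1 + t := rfl; rw [this]; omega)]
      rw [List.map_cons, htail, hshift]
      conv_rhs => rw [show (x :: rest) = x :: rest from rfl]
      simp only [bGo, ← htdef, hdropeq]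
      rw [if_pos h2]
      refine congrArg₂ List.cons ?_ rfl
      refine Prod.ext (by simp) (Prod.ext ?_ (by simp))
      show ((f 0 : Nat) : Int) - 1 = 0 + ((1 + t : Nat) : Int) - 1
      have : f 0 = 1 + t := rfl
      rw [this]; ring
    · rw [if_neg (by simp only [decide_eq_true_eq]; have : f 0 = 1 + t := rfl; rw [this]; push_cast; omega)]
      rw [htail, hshift]
      simp only [bGo, ← htdef, hdropeq]
      rw [if_neg h2]
termination_by tokens.length
decreasing_by simp [List.length_drop]

-- ===== VERDICT (by name: the statement is the Claim_ definition above) =====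
theorem find_repetitions_py_spec : Claim_equal_find_repetitions_py := by
  intro tokens _
  unfold Spec_find_repetitions_py find_repetitions_py
  rw [pipeline_eq]
  simpa using aLoop_eq_bGo tokens 0 []
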